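-- pv_equiv track=rewrite | github.com/showjim/EditPat | src/utils.py | check_tset_line
-- ===== SOURCE A (Python) =====
-- def check_tset_line(tset_list, line):
--     """Check tset line"""
--     ii = -1
--     for i, val in enumerate(tset_list):
--         # last space need here to ensure the end
--         val = r"> {0} ".format(val)
--         if val in line:
--             ii = i
--             return ii
--     return ii
-- ===== SOURCE B (Python) =====
-- def check_tset_line(tset_list, line):
--     """Check tset line: scan the line once for '>' anchors and match all
--     patterns at each anchor, returning the smallest matching tset index."""
--     pats = ["> {0} ".format(v) for v in tset_list]
--     hits = [i
--             for j in range(len(line)) if line[j] == '>'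
--             for i, p in enumerate(pats)
--             if line[j:].startswith(p)]
--     return min(hits, default=-1)
-- ===== Notes on version B (the rewrite author's own statement) =====
-- stated objective: faster
-- what changed: Instead of running a full substring search of '> val ' over the whole line for every tset entry, B scans the line once for '>' anchor positions, tests the (precomputed) patterns only at those anchors with startswith, and returns the minimum matching index (default -1).
import Mathlib
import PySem

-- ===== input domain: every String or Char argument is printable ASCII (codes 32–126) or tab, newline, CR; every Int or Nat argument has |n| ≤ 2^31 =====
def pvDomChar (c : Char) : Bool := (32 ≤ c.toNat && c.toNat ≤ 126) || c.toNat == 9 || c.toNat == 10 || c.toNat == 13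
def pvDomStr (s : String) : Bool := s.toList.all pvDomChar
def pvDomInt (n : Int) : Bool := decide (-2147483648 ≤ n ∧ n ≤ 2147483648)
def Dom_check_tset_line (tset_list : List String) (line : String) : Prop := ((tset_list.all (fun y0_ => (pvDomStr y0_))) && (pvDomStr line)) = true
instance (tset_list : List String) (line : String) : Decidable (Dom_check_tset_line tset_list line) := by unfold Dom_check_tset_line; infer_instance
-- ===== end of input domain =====

-- B scans the line once for '>' anchors and matches every pattern there, returning the
-- smallest matching index; alternative decomposition, same return value as A everywhere.

-- ===== PORT A =====
-- A: for i, val in enumerate(tset_list): if "> {0} ".format(val) in line: return i; return -1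
def checkLoopA : List (Int × String) → String → Int
  | [], _ => -1
  | (i, v) :: rest, line =>
      if PySem.Str.isIn ("> " ++ v ++ " ") line then i else checkLoopA rest line

def check_tset_line (tset_list : List String) (line : String) : Int :=
  checkLoopA (PySem.List.enumerate tset_list) line

-- ===== PORT B =====
-- B: pats = ["> {0} ".format(v) for v in tset_list]
--    hits = [i for j in range(len(line)) if line[j] == '>'
--              for i, p in enumerate(pats) if line[j:].startswith(p)]
-- (line[j] is in range because j comes from range(len(line)), so getD is exact here)
def altHits (pats : List (List Char)) (cs : List Char) : List Int :=
  (List.range cs.length).flatMap (fun j =>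
    if cs.getD j ' ' = '>' then
      (PySem.List.enumerate pats).filterMap (fun p =>
        if PySem.Chars.startswith (cs.drop j) p.2 then some p.1 else none)
    else [])

-- return min(hits, default=-1)
def check_tset_line_alt (tset_list : List String) (line : String) : Int :=
  PySem.List.minD
    (altHits (tset_list.map (fun v => ("> " ++ v ++ " ").toList)) line.toList)
    (fun x => x) (-1)

-- ===== PRECONDITION & SPEC =====
def Spec_check_tset_line (tset_list : List String) (line : String) (out : Int) : Prop := out = check_tset_line_alt tset_list line
instance (tset_list : List String) (line : String) (out : Int) : Decidable (Spec_check_tset_line tset_list line out) := by unfold Spec_check_tset_line; infer_instance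

-- ===== CLAIM (what is proved, stated in full; the proofs are below) =====
def Claim_equal_check_tset_line : Prop := ∀ (tset_list : List String) (line : String), Dom_check_tset_line tset_list line → Spec_check_tset_line tset_list line (check_tset_line tset_list line)

-- ===== LEMMAS AND PROOFS =====

-- "the pattern of v occurs in the line"
def PatIn (v : String) (cs : List Char) : Prop := ("> " ++ v ++ " ").toList <:+: cs


theorem patL (v : String) : ("> " ++ v ++ " ").toList = '>' :: ' ' :: (v.toList ++ [' ']) := by
  simp

theorem mem_enumerate_le {α : Type} (l : List α) (k : Int) :
    ∀ p ∈ PySem.List.enumerate l k, k ≤ p.1 := by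
  induction l generalizing k with
  | nil => simp [PySem.List.enumerate]
  | cons x t ih =>
    intro p hp
    simp only [PySem.List.enumerate, List.mem_cons] at hp
    rcases hp with h | h
    · simp [h]
    · have := ih (k + 1) p h; omega

theorem enumerate_pairwise {α : Type} (l : List α) (k : Int) :
    (PySem.List.enumerate l k).Pairwise (fun a b => a.1 < b.1) := by
  induction l generalizing k with
  | nil => simp [PySem.List.enumerate]
  | cons x t ih =>
    simp only [PySem.List.enumerate, List.pairwise_cons]
    exact ⟨fun p hp => by have := mem_enumerate_le t (k + 1) p hp; omega, ih (k + 1)⟩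

theorem checkLoopA_char (l : List (Int × String)) (line : String)
    (hpw : l.Pairwise (fun a b => a.1 < b.1)) :
    (checkLoopA l line = -1 ∧ ∀ p ∈ l, ¬ PatIn p.2 line.toList) ∨
    (∃ p ∈ l, PatIn p.2 line.toList ∧ checkLoopA l line = p.1 ∧
      ∀ q ∈ l, PatIn q.2 line.toList → p.1 ≤ q.1) := by
  induction l with
  | nil => left; simp [checkLoopA]
  | cons hd t ih =>
    obtain ⟨i, v⟩ := hd
    rw [List.pairwise_cons] at hpw
    by_cases h : PatIn v line.toList
    · right
      refine ⟨(i, v), List.mem_cons_self, h, ?_, ?_⟩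
      · have hb : PySem.Str.isIn ("> " ++ v ++ " ") line = true :=
          (PySem.Str.isIn_iff_infix _ _).2 h
        simp only [checkLoopA, hb, if_true]
      · intro q hq _
        rcases List.mem_cons.1 hq with rfl | hq
        · exact le_refl _
        · exact le_of_lt (hpw.1 q hq)
    · have hf : PySem.Str.isIn ("> " ++ v ++ " ") line = false := by
        rw [Bool.eq_false_iff]
        intro hb
        exact h ((PySem.Str.isIn_iff_infix _ _).1 hb)
      have hstep : checkLoopA ((i, v) :: t) line = checkLoopA t line := by
        simp only [checkLoopA, hf, Bool.false_eq_true, if_false]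
      rcases ih hpw.2 with ⟨h1, h2⟩ | ⟨p, hp, hm, hr, hmin⟩
      · left
        refine ⟨hstep.trans h1, ?_⟩
        intro q hq
        rcases List.mem_cons.1 hq with rfl | hq
        · exact h
        · exact h2 q hq
      · right
        refine ⟨p, List.mem_cons_of_mem _ hp, hm, hstep.trans hr, ?_⟩
        intro q hq hmq
        rcases List.mem_cons.1 hq with rfl | hq
        · exact absurd hmq h
        · exact hmin q hq hmq

theorem enumerate_map {α β : Type} (f : α → β) (l : List α) (k : Int) :
    PySem.List.enumerate (l.map f) k
      = (PySem.List.enumerate l k).map (fun p => (p.1, f p.2)) := by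
  induction l generalizing k with
  | nil => simp [PySem.List.enumerate]
  | cons x t ih => simp [PySem.List.enumerate, ih]

theorem mem_altHits (tset_list : List String) (cs : List Char) (i : Int) :
    i ∈ altHits (tset_list.map (fun v => ("> " ++ v ++ " ").toList)) cs ↔
      ∃ v, (i, v) ∈ PySem.List.enumerate tset_list ∧ PatIn v cs := by
  constructor
  · intro h
    simp only [altHits, enumerate_map, List.mem_flatMap, List.mem_range] at h
    obtain ⟨j, hj, hmem⟩ := h
    split at hmem
    · simp only [List.mem_filterMap, List.mem_map] at hmem
      obtain ⟨p, ⟨q, hq, hpq⟩, heq⟩ := hmem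
      split at heq
      · rename_i hsw
        cases heq
        cases hpq
        refine ⟨q.2, hq, ?_⟩
        have hpre := (PySem.Chars.startswith_iff _ _).1 hsw
        exact (PySem.Chars.isIn_iff_infix _ _).1
          ((PySem.Chars.exists_prefix_drop_iff_isIn _ _).1 ⟨j, hpre⟩)
      · cases heq
    · cases hmem
  · rintro ⟨v, hv, hpat⟩
    have hin : PySem.Chars.isIn ("> " ++ v ++ " ").toList cs = true :=
      (PySem.Chars.isIn_iff_infix _ _).2 hpat
    obtain ⟨j, hpre⟩ := (PySem.Chars.exists_prefix_drop_iff_isIn _ _).2 hin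
    have hne : cs.drop j ≠ [] := by
      intro hnil
      rw [hnil] at hpre
      have := List.IsPrefix.length_le hpre
      simp at this
    have hjlen : j < cs.length := by
      by_contra hge
      exact hne (List.drop_eq_nil_of_le (by omega))
    have hhead : cs.getD j ' ' = '>' := by
      obtain ⟨t, ht⟩ := hpre
      have h1 : cs.drop j = '>' :: (' ' :: (v.toList ++ [' ']) ++ t) := by
        rw [← ht]; simp
      have h2 : cs[j]? = some '>' := by
        rw [← List.head?_drop, h1]; rfl
      simp [List.getD, h2]
    simp only [altHits, enumerate_map, List.mem_flatMap, List.mem_range]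
    refine ⟨j, hjlen, ?_⟩
    rw [if_pos hhead]
    simp only [List.mem_filterMap, List.mem_map]
    refine ⟨(i, ("> " ++ v ++ " ").toList), ⟨(i, v), hv, rfl⟩, ?_⟩
    have hsw : PySem.Chars.startswith (cs.drop j) ("> " ++ v ++ " ").toList = true :=
      (PySem.Chars.startswith_iff _ _).2 hpre
    rw [patL] at hsw
    simp [hsw]

-- ===== VERDICT (by name: the statement is the Claim_ definition above) =====
theorem check_tset_line_spec : Claim_equal_check_tset_line := by
  intro ts line _
  show check_tset_line ts line = check_tset_line_alt ts line
  unfold check_tset_line check_tset_line_alt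
  rcases checkLoopA_char (PySem.List.enumerate ts) line (enumerate_pairwise ts 0) with
    ⟨hA, hnone⟩ | ⟨p, hp, hm, hr, hmin⟩
  · have hnil : altHits (ts.map (fun v => ("> " ++ v ++ " ").toList)) line.toList = [] := by
      rw [List.eq_nil_iff_forall_not_mem]
      intro i hi
      obtain ⟨v, hv, hpat⟩ := (mem_altHits ts line.toList i).1 hi
      exact hnone (i, v) hv hpat
    rw [hA, hnil]
    rfl
  · have hpmem : p.1 ∈ altHits (ts.map (fun v => ("> " ++ v ++ " ").toList)) line.toList :=
      (mem_altHits ts line.toList p.1).2 ⟨p.2, hp, hm⟩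
    cases hmin? : PySem.List.min? (altHits (ts.map (fun v => ("> " ++ v ++ " ").toList)) line.toList) (fun x => x) with
    | none =>
      rw [PySem.List.min?_eq_none_iff] at hmin?
      rw [hmin?] at hpmem
      cases hpmem
    | some m =>
      have hmmem := PySem.List.min?_mem hmin?
      obtain ⟨v', hv', hpat'⟩ := (mem_altHits ts line.toList m).1 hmmem
      have h1 : p.1 ≤ m := hmin (m, v') hv' hpat'
      have h2 : m ≤ p.1 := PySem.List.min?_isMin hmin? p.1 hpmem
      rw [hr]
      simp only [PySem.List.minD, hmin?, Option.getD_some]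
      omega
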